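-- pv_equiv track=rewrite | github.com/marijusar/aoc2023 | 13/main.py | check_reflection
-- ===== SOURCE A (Python) =====
-- def check_reflection(pattern, reflect_point):
--     for j in range(0, reflect_point + 1) :
--         next_index = reflect_point + j + 1
--         prev_index = reflect_point - j
--         if next_index >= len(pattern) or prev_index < 0 :
--             continue
--         if pattern[prev_index] != pattern[next_index] :
--             return False
--
--     return True
-- ===== SOURCE B (Python) =====
-- def check_reflection(pattern, reflect_point):
--     k = max(reflect_point + 1, 0)
--     left = pattern[:k][::-1]
--     right = pattern[k:]
--     return all(a == b for a, b in zip(left, right))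
-- ===== Notes on version B (the rewrite author's own statement) =====
-- stated objective: simpler
-- what changed: B replaces A's center-out loop with index arithmetic and per-iteration bounds-skipping by slicing the pattern into the (clamped, reversed) left half and the right half and comparing them with zip/all, which truncates at the shorter side.
import Mathlib
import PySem

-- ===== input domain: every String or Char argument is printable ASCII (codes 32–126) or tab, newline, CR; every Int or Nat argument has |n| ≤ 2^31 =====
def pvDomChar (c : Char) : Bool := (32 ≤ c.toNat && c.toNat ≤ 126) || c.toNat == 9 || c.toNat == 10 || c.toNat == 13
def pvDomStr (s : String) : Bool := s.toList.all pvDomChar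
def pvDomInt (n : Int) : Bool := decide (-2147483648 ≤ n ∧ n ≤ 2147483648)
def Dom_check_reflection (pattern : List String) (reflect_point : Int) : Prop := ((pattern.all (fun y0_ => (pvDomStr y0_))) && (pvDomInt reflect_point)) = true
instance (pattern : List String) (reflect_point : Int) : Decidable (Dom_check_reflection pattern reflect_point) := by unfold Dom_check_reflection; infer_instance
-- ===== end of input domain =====

-- B splits the pattern into the two mirrored halves and compares them with zip/all instead of
-- A's center-out index arithmetic with bounds-skipping; objective: simpler, same cost.

-- ===== PORT A =====
-- the body of A's for-loop with early return, recursing over the remaining range values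
def checkLoopA (pattern : List String) (reflect_point : Int) : List Int → Bool
  | [] => true
  | j :: rest =>
    let next_index := reflect_point + j + 1
    let prev_index := reflect_point - j
    if next_index ≥ (pattern.length : Int) ∨ prev_index < 0 then
      checkLoopA pattern reflect_point rest
    else if PySem.List.pyGet? pattern prev_index ≠ PySem.List.pyGet? pattern next_index then
      false
    else
      checkLoopA pattern reflect_point rest

def check_reflection (pattern : List String) (reflect_point : Int) : Bool :=
  checkLoopA pattern reflect_point (PySem.List.pyRange 0 (reflect_point + 1) 1)

-- ===== PORT B =====
def check_reflection_alt (pattern : List String) (reflect_point : Int) : Bool :=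
  let k := max (reflect_point + 1) 0
  let left := (PySem.List.slice pattern none (some k)).reverse
  let right := PySem.List.slice pattern (some k) none
  (left.zip right).all (fun p => p.1 == p.2)

-- ===== PRECONDITION & SPEC =====
def Spec_check_reflection (pattern : List String) (reflect_point : Int) (out : Bool) : Prop := out = check_reflection_alt pattern reflect_point
instance (pattern : List String) (reflect_point : Int) (out : Bool) : Decidable (Spec_check_reflection pattern reflect_point out) := by unfold Spec_check_reflection; infer_instance

-- ===== CLAIM (what is proved, stated in full; the proofs are below) =====
def Claim_equal_check_reflection : Prop := ∀ (pattern : List String) (reflect_point : Int), Dom_check_reflection pattern reflect_point → Spec_check_reflection pattern reflect_point (check_reflection pattern reflect_point)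

-- ===== LEMMAS AND PROOFS =====

-- once next_index is past the end, every later iteration is skipped and the loop returns True
lemma checkLoopA_skipAll (pattern : List String) (rp : Int) :
    ∀ (t : Nat) (a : Int), 0 ≤ a → (rp + 1 - a).toNat = t →
      (pattern.length : Int) ≤ rp + a + 1 →
      checkLoopA pattern rp (PySem.List.pyRange a (rp + 1) 1) = true := by
  intro t
  induction t with
  | zero =>
    intro a _ ht _
    rw [PySem.List.pyRange_one_eq_nil (by omega)]
    rfl
  | succ t ih =>
    intro a ha ht hn
    rw [PySem.List.pyRange_one_cons (by omega)]
    simp only [checkLoopA]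
    rw [if_pos (Or.inl (by omega))]
    exact ih (a + 1) (by omega) (by omega) (by omega)

-- the loop from position a equals zip-all of the two mirrored halves with the first a pairs dropped
lemma checkLoopA_eq_zip (pattern : List String) (rp : Int) (hrp : 0 ≤ rp) :
    ∀ (t : Nat) (a : Int), 0 ≤ a → (rp + 1 - a).toNat = t →
      checkLoopA pattern rp (PySem.List.pyRange a (rp + 1) 1)
        = ((((pattern.take (rp + 1).toNat).reverse).drop a.toNat).zip
            ((pattern.drop (rp + 1).toNat).drop a.toNat)).all (fun p => p.1 == p.2) := by
  intro t
  induction t with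
  | zero =>
    intro a ha ht
    rw [PySem.List.pyRange_one_eq_nil (by omega)]
    have hL : (((pattern.take (rp + 1).toNat).reverse).drop a.toNat) = [] := by
      apply List.drop_eq_nil_of_le
      simp only [List.length_reverse, List.length_take]
      omega
    rw [hL]
    rfl
  | succ t ih =>
    intro a ha ht
    rw [PySem.List.pyRange_one_cons (by omega)]
    simp only [checkLoopA]
    set n := pattern.length with hn
    by_cases hskip : rp + a + 1 ≥ (n : Int)
    · -- next_index out of range: A skips everything; B's right half is already exhausted
      rw [if_pos (Or.inl (by omega))]
      rw [checkLoopA_skipAll pattern rp t (a + 1) (by omega) (by omega) (by omega)]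
      have hR : ((pattern.drop (rp + 1).toNat).drop a.toNat) = [] := by
        apply List.drop_eq_nil_of_le
        simp only [List.length_drop]
        omega
      rw [hR, List.zip_nil_right]
      rfl
    · rw [not_le] at hskip
      rw [if_neg (by omega)]
      -- both halves are nonempty at position a: peel one pair off the zip
      have hla : a.toNat < ((pattern.take (rp + 1).toNat).reverse).length := by
        simp only [List.length_reverse, List.length_take]
        omega
      have hra : a.toNat < ((pattern.drop (rp + 1).toNat)).length := by
        simp only [List.length_drop]
        omega
      rw [List.drop_eq_getElem_cons hla, List.drop_eq_getElem_cons hra,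
        List.zip_cons_cons, List.all_cons]
      have hgl : ((pattern.take (rp + 1).toNat).reverse)[a.toNat] = pattern[(rp - a).toNat]'(by omega) := by
        rw [List.getElem_reverse, List.getElem_take]
        congr 1
        simp only [List.length_take]
        omega
      have hgr : ((pattern.drop (rp + 1).toNat))[a.toNat] = pattern[(rp + a + 1).toNat]'(by omega) := by
        rw [List.getElem_drop]
        congr 1
        omega
      have hpl : PySem.List.pyGet? pattern (rp - a) = some (pattern[(rp - a).toNat]'(by omega)) :=
        PySem.List.pyGet?_eq_some_getElem (i := rp - a) pattern (by omega) (by omega)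
      have hpr : PySem.List.pyGet? pattern (rp + a + 1) = some (pattern[(rp + a + 1).toNat]'(by omega)) :=
        PySem.List.pyGet?_eq_some_getElem (i := rp + a + 1) pattern (by omega) (by omega)
      by_cases heq : pattern[(rp - a).toNat]'(by omega) = pattern[(rp + a + 1).toNat]'(by omega)
      · rw [if_neg (by simp [hpl, hpr, heq])]
        rw [ih (a + 1) (by omega) (by omega)]
        have hnat : (a + 1).toNat = a.toNat + 1 := by omega
        simp [hgl, hgr, heq, hnat]
      · rw [if_pos (by simp [hpl, hpr, heq])]
        simp [hgl, hgr, heq]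

-- ===== VERDICT (by name: the statement is the Claim_ definition above) =====
theorem check_reflection_spec : Claim_equal_check_reflection := by
  intro pattern rp _
  unfold Spec_check_reflection check_reflection
  simp only [check_reflection_alt]
  by_cases hrp : 0 ≤ rp
  · have hk : max (rp + 1) 0 = ((rp + 1).toNat : Int) := by omega
    rw [hk, PySem.List.slice_to_natCast, PySem.List.slice_from_natCast]
    have := checkLoopA_eq_zip pattern rp hrp (rp + 1).toNat 0 (by omega) (by omega)
    simpa using this
  · rw [PySem.List.pyRange_one_eq_nil (by omega)]
    have hk : max (rp + 1) 0 = ((0 : Nat) : Int) := by omega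
    rw [hk, PySem.List.slice_to_natCast]
    simp [checkLoopA]
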